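-- pv_equiv track=rewrite | github.com/baxtiyorovbekzod/Python-Dictionary-Practice | randomusers.py | group_users_by_nationality
-- ===== SOURCE A (Python) =====
-- def group_users_by_nationality(data: dict) -> dict:
--     """
--     Groups and counts users by their nationality.
--
--     Args:
--         data (dict): JSON data containing user records.
--
--     Returns:
--         dict: Dictionary with nationality as keys and count as values.
--     """
--     results={}
--     for user in data['results']:
--         nat=user['nat']
--         if nat in results:
--             results[nat] += 1
--         else:
--             results[nat] = 1
--
--     return results
-- ===== SOURCE B (Python) =====
-- def group_users_by_nationality(data: dict) -> dict:
--     """Count users per nationality: materialize the nationality list once,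
--     then build the result as a comprehension over the first-occurrence-ordered
--     distinct nationalities, counting each in the list."""
--     nats = [user['nat'] for user in data['results']]
--     return {nat: nats.count(nat) for nat in dict.fromkeys(nats)}
-- ===== Notes on version B (the rewrite author's own statement) =====
-- stated objective: simpler
-- what changed: Replaces the stateful dict-accumulation loop (membership test, increment-or-initialize) with a two-phase comprehension: extract all nationalities, then map each first-occurrence-ordered distinct nationality to its list count.
import Mathlib
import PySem

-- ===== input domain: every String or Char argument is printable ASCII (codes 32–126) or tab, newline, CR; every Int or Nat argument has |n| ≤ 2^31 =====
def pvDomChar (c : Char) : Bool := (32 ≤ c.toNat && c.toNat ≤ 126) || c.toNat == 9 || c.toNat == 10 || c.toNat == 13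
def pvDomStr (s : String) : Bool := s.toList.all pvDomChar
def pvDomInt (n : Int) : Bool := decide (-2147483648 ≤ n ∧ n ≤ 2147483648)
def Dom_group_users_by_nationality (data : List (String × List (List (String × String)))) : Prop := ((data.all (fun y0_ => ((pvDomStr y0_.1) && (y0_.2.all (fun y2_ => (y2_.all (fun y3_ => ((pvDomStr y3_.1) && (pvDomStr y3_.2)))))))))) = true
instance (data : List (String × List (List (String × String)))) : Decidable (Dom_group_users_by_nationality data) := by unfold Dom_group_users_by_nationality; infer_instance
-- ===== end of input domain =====

-- B replaces A's stateful increment-or-initialize dict loop with a two-phase shape: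
-- extract the nationality list, then map each distinct nationality (first-occurrence order)
-- to its count in that list. Same return value; no speed claim.

-- ===== PORT A =====
-- one loop iteration: user['nat'] (KeyError → none), then the in/increment branch
def pvStepA (res? : Option (PySem.Dict String Int)) (user : List (String × String)) :
    Option (PySem.Dict String Int) :=
  match res? with
  | none => none
  | some res =>
    match (PySem.Dict.mk user).get? "nat" with
    | none => none
    | some nat =>
      some (if res.contains nat then res.insert nat (res.getD nat 0 + 1) else res.insert nat 1)

def group_users_by_nationality (data : List (String × List (List (String × String)))) :
    List (String × Int) :=
  match (PySem.Dict.mk data).get? "results" with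
  | none => []          -- KeyError 'results': excluded by Pre_
  | some users =>
    match users.foldl pvStepA (some PySem.Dict.empty) with
    | none => []        -- KeyError 'nat': excluded by Pre_
    | some res => res.items

-- ===== PORT B =====
-- [user['nat'] for user in users]  (none = KeyError somewhere)
def pvNatsOf : List (List (String × String)) → Option (List String)
  | [] => some []
  | u :: rest =>
    match (PySem.Dict.mk u).get? "nat", pvNatsOf rest with
    | some n, some ns => some (n :: ns)
    | _, _ => none

def group_users_by_nationality_alt (data : List (String × List (List (String × String)))) :
    List (String × Int) :=
  match (PySem.Dict.mk data).get? "results" with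
  | none => []          -- KeyError 'results': excluded by Pre_
  | some users =>
    match pvNatsOf users with
    | none => []        -- KeyError 'nat': excluded by Pre_
    | some nats => (PySem.List.dedup nats).map (fun nat => (nat, (nats.count nat : Int)))

-- ===== PRECONDITION & SPEC =====
-- Pre_ excludes exactly the inputs where Python A raises KeyError:
-- a missing 'results' key, or a user record without a 'nat' key.
def Pre_group_users_by_nationality (data : List (String × List (List (String × String)))) : Prop :=
  ((PySem.Dict.mk data).get? "results").isSome = true ∧
  ∀ u ∈ ((PySem.Dict.mk data).get? "results").getD [],
    ((PySem.Dict.mk u).get? "nat").isSome = true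

instance (data : List (String × List (List (String × String)))) :
    Decidable (Pre_group_users_by_nationality data) := by
  unfold Pre_group_users_by_nationality; infer_instance

def pvWitness_group_users_by_nationality : (List (String × List (List (String × String)))) :=
  [("results", [[("nat", "US")], [("nat", "FR")], [("nat", "US")]])]

def Spec_group_users_by_nationality (data : List (String × List (List (String × String))))
    (out : List (String × Int)) : Prop := out = group_users_by_nationality_alt data

instance (data : List (String × List (List (String × String)))) (out : List (String × Int)) :
    Decidable (Spec_group_users_by_nationality data out) := by
  unfold Spec_group_users_by_nationality; infer_instance

-- ===== CLAIM (what is proved, stated in full; the proofs are below) =====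
def Claim_equal_group_users_by_nationality : Prop := ∀ (data : List (String × List (List (String × String)))), Dom_group_users_by_nationality data → Pre_group_users_by_nationality data → Spec_group_users_by_nationality data (group_users_by_nationality data)

-- ===== LEMMAS AND PROOFS =====

-- the 'nat' value of a user record, total form (equals get? under Pre_)
def pvNatOf (u : List (String × String)) : String :=
  ((PySem.Dict.mk u).get? "nat").getD ""

lemma pvNatsOf_eq_some (users : List (List (String × String)))
    (h : ∀ u ∈ users, ((PySem.Dict.mk u).get? "nat").isSome = true) :
    pvNatsOf users = some (users.map pvNatOf) := by
  induction users with
  | nil => rfl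
  | cons u rest ih =>
    have hu := h u (by simp)
    obtain ⟨n, hn⟩ := Option.isSome_iff_exists.mp hu
    simp [pvNatsOf, hn, ih (fun v hv => h v (by simp [hv])), pvNatOf]

lemma pvFoldA_eq (users : List (List (String × String))) (d : PySem.Dict String Int)
    (h : ∀ u ∈ users, ((PySem.Dict.mk u).get? "nat").isSome = true) :
    users.foldl pvStepA (some d)
      = some ((users.map pvNatOf).foldl
          (fun d x => if d.contains x then d.insert x (d.getD x 0 + 1) else d.insert x 1) d) := by
  induction users generalizing d with
  | nil => rfl
  | cons u rest ih =>
    have hu := h u (by simp)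
    obtain ⟨n, hn⟩ := Option.isSome_iff_exists.mp hu
    simp only [List.foldl_cons, List.map_cons]
    rw [show pvStepA (some d) u
        = some (if d.contains n then d.insert n (d.getD n 0 + 1) else d.insert n 1) by
          simp [pvStepA, hn]]
    rw [ih _ (fun v hv => h v (by simp [hv]))]
    simp [pvNatOf, hn]

-- A's branching step IS the counting insert step (when the key is absent its count is 0)
lemma pvStep_eq :
    (fun (d : PySem.Dict String Int) x =>
        if d.contains x then d.insert x (d.getD x 0 + 1) else d.insert x 1)
      = (fun d x => d.insert x (d.getD x 0 + 1)) := by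
  funext d x
  by_cases hc : d.contains x
  · simp [hc]
  · have h0 : d.getD x 0 = 0 :=
      PySem.Dict.getD_of_not_contains d 0 (by simpa using hc)
    simp [hc, h0]

-- ===== VERDICT (by name: the statement is the Claim_ definition above) =====
theorem group_users_by_nationality_spec : Claim_equal_group_users_by_nationality := by
  intro data _ hpre
  unfold Spec_group_users_by_nationality
  unfold group_users_by_nationality group_users_by_nationality_alt
  unfold Pre_group_users_by_nationality at hpre
  obtain ⟨hsome, hall⟩ := hpre
  obtain ⟨users, hres⟩ := Option.isSome_iff_exists.mp hsome
  rw [hres] at hall ⊢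
  simp only [Option.getD_some] at hall
  simp only
  rw [pvNatsOf_eq_some users hall, pvFoldA_eq users PySem.Dict.empty hall, pvStep_eq]
  simp [PySem.Dict.foldl_insert_getD_add_one_eq_counter, PySem.Dict.items_counter]
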